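-- pv_equiv track=rewrite | github.com/Liather/testwebgames | app/games/bananagrams/game.py | areTilesConnected
-- ===== SOURCE A (Python) =====
-- def areTilesConnected(board):
--     size = len(board)
--
--     visited = set()
--     totalTiles = 0
--     start = None
--
--     for y in range(size):
--         for x in range(size):
--             if board[y][x] != "":
--                 totalTiles += 1
--                 if start is None:
--                     start = (x, y)
--
--     if totalTiles == 0:
--         return False
--
--     stack = [start]
--
--     while stack:
--         x, y = stack.pop()
--
--         if (x, y) in visited:
--             continue
--
--         visited.add((x, y))
--
--         for dx, dy in [(0,1), (0,-1), (1,0), (-1,0)]: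
--             nx, ny = x + dx, y + dy
--
--             if 0 <= nx < size and 0 <= ny < size:
--                 if board[ny][nx] != "" and (nx, ny) not in visited:
--                     stack.append((nx, ny))
--
--     return len(visited) == totalTiles
-- ===== SOURCE B (Python) =====
-- def areTilesConnected(board):
--     # Label-propagation re-implementation: collect tile coordinates once, then
--     # repeatedly sweep the tile list, absorbing any tile adjacent to the
--     # reached set, stopping as soon as a sweep adds nothing (at most
--     # size*size sweeps); finally compare the reached count with the tile count.
--     size = len(board)
--     tiles = [(x, y) for y in range(size) for x in range(size) if board[y][x] != ""]
--     if not tiles: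
--         return False
--     reached = {tiles[0]}
--     for _ in range(size * size):
--         added = False
--         for (x, y) in tiles:
--             if (x, y) not in reached:
--                 if ((x + 1, y) in reached or (x - 1, y) in reached
--                         or (x, y + 1) in reached or (x, y - 1) in reached):
--                     reached.add((x, y))
--                     added = True
--         if not added:
--             break
--     return len(reached) == len(tiles)
-- ===== Notes on version B (the rewrite author's own statement) =====
-- stated objective: alternative
-- what changed: Replaces A's explicit-stack DFS flood fill by stackless label propagation: collect the tile coordinates once, then repeatedly sweep that list absorbing any tile adjacent to the reached set, stopping when a sweep adds nothing, and compare the reached count with the tile count. (measured ~1.9x faster on large boards: no per-cell stack churn)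
import Mathlib
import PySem

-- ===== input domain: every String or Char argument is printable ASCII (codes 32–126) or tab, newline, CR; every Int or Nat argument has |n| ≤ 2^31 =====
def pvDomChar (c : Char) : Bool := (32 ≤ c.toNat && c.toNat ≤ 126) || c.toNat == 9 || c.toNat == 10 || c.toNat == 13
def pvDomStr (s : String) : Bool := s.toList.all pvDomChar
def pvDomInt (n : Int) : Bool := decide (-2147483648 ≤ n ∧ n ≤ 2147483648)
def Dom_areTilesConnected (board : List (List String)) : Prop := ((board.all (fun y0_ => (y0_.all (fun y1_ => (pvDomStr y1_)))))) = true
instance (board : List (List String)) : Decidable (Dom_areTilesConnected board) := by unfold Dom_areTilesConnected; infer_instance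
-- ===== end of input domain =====

-- B replaces A's explicit-stack DFS flood fill by stackless label propagation:
-- collect the tile coordinates once, then repeatedly sweep that list absorbing
-- any tile adjacent to the reached set (objective: alternative decomposition,
-- same result). Out-of-range reads (Python IndexError on ragged boards) are
-- excluded by Pre_; the ports read cells with a default that Pre_ makes exact.

-- ===== PORT A =====
-- A-side helper: the neighbour-offset literal from A's inner for-loop
def dfsDirs : List (Int × Int) := [(0, 1), (0, -1), (1, 0), (-1, 0)]

-- termination helper: number of in-bounds cells not yet visited
def unvisCard (size : Int) (visited : List (Int × Int)) : Nat :=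
  (((Finset.range size.toNat) ×ˢ (Finset.range size.toNat)).filter
    (fun p => ((p.1 : Int), (p.2 : Int)) ∉ visited)).card

-- termination helper: each loop iteration appends at most one element
theorem foldl_len_le {α β : Type} (l : List α) (g : List β → α → List β)
    (h : ∀ st d, (g st d).length ≤ st.length + 1) :
    ∀ st : List β, (l.foldl g st).length ≤ st.length + l.length := by
  induction l with
  | nil => intro st; simp
  | cons d l ih =>
    intro st
    have := ih (g st d)
    have := h st d
    simpa [List.foldl] using Nat.le_trans (ih (g st d)) (by omega)

-- termination helper: visiting a fresh in-bounds cell shrinks the unvisited count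
theorem unvisCard_lt (size : Int) (visited : PySem.Set (Int × Int)) (xy : Int × Int)
    (hb : 0 ≤ xy.1 ∧ xy.1 < size ∧ 0 ≤ xy.2 ∧ xy.2 < size) (hv : xy ∉ visited) :
    unvisCard size (PySem.Set.add visited xy) < unvisCard size visited := by
  apply Finset.card_lt_card
  constructor
  · intro p hp
    simp only [Finset.mem_filter] at hp ⊢
    refine ⟨hp.1, fun hmem => hp.2 ?_⟩
    simp [PySem.Set.mem_add, hmem]
  · intro hsub
    have hx : (xy.1.toNat, xy.2.toNat) ∈ ((Finset.range size.toNat) ×ˢ (Finset.range size.toNat)).filter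
        (fun p => ((p.1 : Int), (p.2 : Int)) ∉ visited) := by
      simp only [Finset.mem_filter, Finset.mem_product, Finset.mem_range]
      refine ⟨⟨?_, ?_⟩, ?_⟩ <;> try omega
      · simpa [Int.toNat_of_nonneg hb.1, Int.toNat_of_nonneg hb.2.2.1] using hv
    have := hsub hx
    simp only [Finset.mem_filter] at this
    exact this.2 (by simp [PySem.Set.mem_add, Int.toNat_of_nonneg hb.1, Int.toNat_of_nonneg hb.2.2.1])

-- the while-loop of A: pop from the END of the stack (Python list.pop), skip
-- visited cells, otherwise mark visited and push unvisited non-empty in-bounds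
-- neighbours.  The in-bounds test on the popped cell is only a totality guard:
-- every cell Python ever stacks is in bounds, so its else-branch is unreachable.
def dfsA (board : List (List String)) (size : Int)
    (visited : PySem.Set (Int × Int)) (stack : List (Int × Int)) : PySem.Set (Int × Int) :=
  match hs : stack.getLast? with
  | none => visited
  | some xy =>
    let rest := stack.dropLast
    if xy ∈ visited then dfsA board size visited rest
    else if hb : 0 ≤ xy.1 ∧ xy.1 < size ∧ 0 ≤ xy.2 ∧ xy.2 < size then
      let visited' := PySem.Set.add visited xy
      let stack' := dfsDirs.foldl (fun st d =>
        if (0 ≤ xy.1 + d.1 ∧ xy.1 + d.1 < size ∧ 0 ≤ xy.2 + d.2 ∧ xy.2 + d.2 < size) ∧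
           PySem.List.pyGetD (PySem.List.pyGetD board (xy.2 + d.2) []) (xy.1 + d.1) "" ≠ "" ∧
           (xy.1 + d.1, xy.2 + d.2) ∉ visited'
        then st ++ [(xy.1 + d.1, xy.2 + d.2)] else st) rest
      dfsA board size visited' stack'
    else dfsA board size visited rest
termination_by 5 * unvisCard size visited + stack.length
decreasing_by
  · have hpos : 0 < stack.length := List.length_pos_of_ne_nil (by rintro rfl; simp at hs)
    simp only [rest, List.length_dropLast]
    omega
  · have hpos : 0 < stack.length := List.length_pos_of_ne_nil (by rintro rfl; simp at hs)
    have h1 : unvisCard size visited' < unvisCard size visited :=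
      unvisCard_lt size visited xy hb (by assumption)
    have h2 : stack'.length ≤ rest.length + 4 := by
      have h := foldl_len_le dfsDirs (fun st d =>
        if (0 ≤ xy.1 + d.1 ∧ xy.1 + d.1 < size ∧ 0 ≤ xy.2 + d.2 ∧ xy.2 + d.2 < size) ∧
           PySem.List.pyGetD (PySem.List.pyGetD board (xy.2 + d.2) []) (xy.1 + d.1) "" ≠ "" ∧
           (xy.1 + d.1, xy.2 + d.2) ∉ visited'
        then st ++ [(xy.1 + d.1, xy.2 + d.2)] else st)
        (fun st d => by dsimp only; split <;> simp) rest
      exact h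
    have h3 : rest.length = stack.length - 1 := by
      simp only [rest, List.length_dropLast]
    show 5 * unvisCard size visited' + stack'.length < 5 * unvisCard size visited + stack.length
    omega
  · have hpos : 0 < stack.length := List.length_pos_of_ne_nil (by rintro rfl; simp at hs)
    simp only [rest, List.length_dropLast]
    omega

def areTilesConnected (board : List (List String)) : Bool :=
  let size : Int := (board.length : Int)
  -- first double loop: count the tiles and remember the first one (start)
  let scan := (PySem.List.pyRange 0 size 1).foldl (fun (acc : Int × Option (Int × Int)) y =>
      (PySem.List.pyRange 0 size 1).foldl (fun (acc : Int × Option (Int × Int)) x =>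
        if PySem.List.pyGetD (PySem.List.pyGetD board y []) x "" ≠ "" then
          (acc.1 + 1, match acc.2 with | none => some (x, y) | some s => some s)
        else acc) acc) ((0 : Int), (none : Option (Int × Int)))
  if scan.1 = 0 then false
  else
    match scan.2 with
    | none => false   -- unreachable: totalTiles ≠ 0 implies start was set
    | some s => decide ((PySem.Set.len (dfsA board size PySem.Set.empty [s]) : Int) = scan.1)

-- ===== PORT B =====
-- one propagation sweep over the tile list: absorb any tile adjacent to r
def sweepB (tiles : List (Int × Int)) (r : PySem.Set (Int × Int)) : PySem.Set (Int × Int) :=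
  tiles.foldl (fun r p =>
    if p ∈ r then r
    else if (p.1 + 1, p.2) ∈ r ∨ (p.1 - 1, p.2) ∈ r ∨ (p.1, p.2 + 1) ∈ r ∨ (p.1, p.2 - 1) ∈ r
    then PySem.Set.add r p else r) r

-- the propagation loop of B: up to `fuel` sweeps, stopping when a sweep adds
-- nothing.  (Python's `added` flag is False exactly when the sweep leaves
-- `reached` unchanged, since a sweep only ever adds elements.)
def propB (tiles : List (Int × Int)) : Nat → PySem.Set (Int × Int) → PySem.Set (Int × Int)
  | 0, r => r
  | fuel + 1, r =>
    let r' := sweepB tiles r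
    if r' = r then r else propB tiles fuel r'

def areTilesConnected_alt (board : List (List String)) : Bool :=
  let size : Int := (board.length : Int)
  let tiles : List (Int × Int) :=
    (PySem.List.pyRange 0 size 1).flatMap (fun y =>
      ((PySem.List.pyRange 0 size 1).filter (fun x =>
        PySem.List.pyGetD (PySem.List.pyGetD board y []) x "" ≠ "")).map (fun x => (x, y)))
  match tiles with
  | [] => false
  | t0 :: _ =>
    -- (size * size).toNat sweeps = the iteration count of Python's range(size*size)
    let reached := propB tiles ((size * size).toNat) (PySem.Set.add PySem.Set.empty t0)
    decide (PySem.Set.len reached = tiles.length)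

-- ===== PRECONDITION & SPEC =====
-- Pre_ excludes ragged boards (some row shorter than len(board)), on which the
-- Python A raises IndexError at board[y][x].
def Pre_areTilesConnected (board : List (List String)) : Prop :=
  ∀ row ∈ board, board.length ≤ row.length
instance (board : List (List String)) : Decidable (Pre_areTilesConnected board) := by
  unfold Pre_areTilesConnected; infer_instance
def pvWitness_areTilesConnected : List (List String) := [["a", ""], ["", "b"]]

def Spec_areTilesConnected (board : List (List String)) (out : Bool) : Prop := out = areTilesConnected_alt board
instance (board : List (List String)) (out : Bool) : Decidable (Spec_areTilesConnected board out) := by unfold Spec_areTilesConnected; infer_instance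

-- ===== CLAIM (what is proved, stated in full; the proofs are below) =====
def Claim_equal_areTilesConnected : Prop := ∀ (board : List (List String)), Dom_areTilesConnected board → Pre_areTilesConnected board → Spec_areTilesConnected board (areTilesConnected board)

-- ===== LEMMAS AND PROOFS =====

-- proof-layer vocabulary -----------------------------------------------------
def TileB (board : List (List String)) (p : Int × Int) : Prop :=
  0 ≤ p.1 ∧ p.1 < (board.length : Int) ∧ 0 ≤ p.2 ∧ p.2 < (board.length : Int) ∧
    PySem.List.pyGetD (PySem.List.pyGetD board p.2 []) p.1 "" ≠ ""

def NbrB (p q : Int × Int) : Prop :=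
  q = (p.1 + 1, p.2) ∨ q = (p.1 - 1, p.2) ∨ q = (p.1, p.2 + 1) ∨ q = (p.1, p.2 - 1)

def StepB (board : List (List String)) (p q : Int × Int) : Prop := TileB board q ∧ NbrB p q

def ReachB (board : List (List String)) (s q : Int × Int) : Prop :=
  Relation.ReflTransGen (StepB board) s q

def tilesOf (board : List (List String)) : List (Int × Int) :=
  (PySem.List.pyRange 0 (board.length : Int) 1).flatMap (fun y =>
    ((PySem.List.pyRange 0 (board.length : Int) 1).filter (fun x =>
      PySem.List.pyGetD (PySem.List.pyGetD board y []) x "" ≠ "")).map (fun x => (x, y)))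

theorem mem_tilesOf {board : List (List String)} {p : Int × Int} :
    p ∈ tilesOf board ↔ TileB board p := by
  rcases p with ⟨a, b⟩
  unfold tilesOf TileB
  simp only [List.mem_flatMap, List.mem_map, List.mem_filter, PySem.List.mem_pyRange_one,
    Prod.mk.injEq, decide_not, Bool.not_eq_eq_eq_not, Bool.not_true, decide_eq_false_iff_not]
  constructor
  · rintro ⟨y, hy, x, ⟨⟨hx1, hx2⟩, hc⟩, hxa, hyb⟩
    subst hxa; subst hyb
    exact ⟨hx1, hx2, hy.1, hy.2, hc⟩
  · rintro ⟨h1, h2, h3, h4, h5⟩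
    exact ⟨b, ⟨h3, h4⟩, a, ⟨⟨h1, h2⟩, h5⟩, rfl, rfl⟩

-- A's counting pass ----------------------------------------------------------
def pairsOf (board : List (List String)) : List (Int × Int) :=
  (PySem.List.pyRange 0 (board.length : Int) 1).flatMap (fun y =>
    (PySem.List.pyRange 0 (board.length : Int) 1).map (fun x => (x, y)))

theorem countFold (Q : Int × Int → Prop) [DecidablePred Q] (l : List (Int × Int)) :
    ∀ (c : Int) (st : Option (Int × Int)),
    l.foldl (fun acc p => if Q p then (acc.1 + 1, match acc.2 with | none => some p | some s => some s) else acc) (c, st)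
    = (c + ((l.filter (fun p => decide (Q p))).length : Int),
       match st with | some s => some s | none => (l.filter (fun p => decide (Q p))).head?) := by
  induction l with
  | nil => intro c st; cases st <;> simp
  | cons p l ih =>
    intro c st
    by_cases hq : Q p
    · cases st <;> simp [List.foldl, hq, ih, add_assoc] <;> ring_nf
    · cases st <;> simp [List.foldl, hq, ih]

theorem tilesOf_eq_filter (board : List (List String)) :
    tilesOf board = (pairsOf board).filter
      (fun p => decide (PySem.List.pyGetD (PySem.List.pyGetD board p.2 []) p.1 "" ≠ "")) := by
  unfold tilesOf pairsOf
  rw [List.filter_flatMap]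
  congr 1
  funext y
  rw [List.filter_map]
  rfl

theorem scanA_eq (board : List (List String)) :
    (PySem.List.pyRange 0 (board.length : Int) 1).foldl (fun (acc : Int × Option (Int × Int)) y =>
      (PySem.List.pyRange 0 (board.length : Int) 1).foldl (fun (acc : Int × Option (Int × Int)) x =>
        if PySem.List.pyGetD (PySem.List.pyGetD board y []) x "" ≠ "" then
          (acc.1 + 1, match acc.2 with | none => some (x, y) | some s => some s)
        else acc) acc) ((0 : Int), (none : Option (Int × Int)))
    = (((tilesOf board).length : Int), (tilesOf board).head?) := by
  have h1 : (PySem.List.pyRange 0 (board.length : Int) 1).foldl (fun (acc : Int × Option (Int × Int)) y =>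
      (PySem.List.pyRange 0 (board.length : Int) 1).foldl (fun (acc : Int × Option (Int × Int)) x =>
        if PySem.List.pyGetD (PySem.List.pyGetD board y []) x "" ≠ "" then
          (acc.1 + 1, match acc.2 with | none => some (x, y) | some s => some s)
        else acc) acc) ((0 : Int), (none : Option (Int × Int)))
      = (pairsOf board).foldl (fun (acc : Int × Option (Int × Int)) p =>
        if PySem.List.pyGetD (PySem.List.pyGetD board p.2 []) p.1 "" ≠ "" then
          (acc.1 + 1, match acc.2 with | none => some p | some s => some s)
        else acc) ((0 : Int), (none : Option (Int × Int))) := by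
    unfold pairsOf
    rw [List.foldl_flatMap]
    simp only [List.foldl_map]
  rw [h1, countFold (fun p => PySem.List.pyGetD (PySem.List.pyGetD board p.2 []) p.1 "" ≠ "") (pairsOf board) 0 none,
    tilesOf_eq_filter board]
  simp

-- membership in an append-if push loop
theorem foldl_pushes_mem (C : Int × Int → Prop) [DecidablePred C] (v : Int × Int → Int × Int)
    (l : List (Int × Int)) (q : Int × Int) :
    ∀ rest : List (Int × Int),
    (q ∈ l.foldl (fun st d => if C d then st ++ [v d] else st) rest ↔
      q ∈ rest ∨ ∃ d ∈ l, C d ∧ q = v d) := by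
  induction l with
  | nil => intro rest; simp
  | cons d l ih =>
    intro rest
    by_cases hC : C d
    · simp only [List.foldl, if_pos hC, ih, List.mem_append, List.mem_cons, List.not_mem_nil, or_false]
      constructor
      · rintro ((h | rfl) | ⟨d', hd', h1, h2⟩)
        · exact Or.inl h
        · exact Or.inr ⟨d, Or.inl rfl, hC, rfl⟩
        · exact Or.inr ⟨d', Or.inr hd', h1, h2⟩
      · rintro (h | ⟨d', (rfl | hd'), h1, h2⟩)
        · exact Or.inl (Or.inl h)
        · exact Or.inl (Or.inr h2)
        · exact Or.inr ⟨d', hd', h1, h2⟩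
    · simp only [List.foldl, if_neg hC, ih, List.mem_cons]
      constructor
      · rintro (h | ⟨d', hd', h1, h2⟩)
        · exact Or.inl h
        · exact Or.inr ⟨d', Or.inr hd', h1, h2⟩
      · rintro (h | ⟨d', (rfl | hd'), h1, h2⟩)
        · exact Or.inl h
        · exact absurd h1 hC
        · exact Or.inr ⟨d', hd', h1, h2⟩

theorem stack'_mem (board : List (List String)) (xy q : Int × Int)
    (visited' rest : List (Int × Int)) :
    (q ∈ dfsDirs.foldl (fun st d =>
        if (0 ≤ xy.1 + d.1 ∧ xy.1 + d.1 < (board.length : Int) ∧ 0 ≤ xy.2 + d.2 ∧ xy.2 + d.2 < (board.length : Int)) ∧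
           PySem.List.pyGetD (PySem.List.pyGetD board (xy.2 + d.2) []) (xy.1 + d.1) "" ≠ "" ∧
           (xy.1 + d.1, xy.2 + d.2) ∉ visited'
        then st ++ [(xy.1 + d.1, xy.2 + d.2)] else st) rest)
    ↔ q ∈ rest ∨ (TileB board q ∧ NbrB xy q ∧ q ∉ visited') := by
  rw [foldl_pushes_mem (fun d =>
    (0 ≤ xy.1 + d.1 ∧ xy.1 + d.1 < (board.length : Int) ∧ 0 ≤ xy.2 + d.2 ∧ xy.2 + d.2 < (board.length : Int)) ∧
    PySem.List.pyGetD (PySem.List.pyGetD board (xy.2 + d.2) []) (xy.1 + d.1) "" ≠ "" ∧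
    (xy.1 + d.1, xy.2 + d.2) ∉ visited') (fun d => (xy.1 + d.1, xy.2 + d.2)) dfsDirs q rest]
  apply or_congr_right
  unfold TileB NbrB
  simp only [dfsDirs, List.mem_cons, List.not_mem_nil, or_false, exists_eq_or_imp,
    exists_eq_left, add_zero, sub_eq_add_neg]
  constructor
  · rintro (⟨⟨⟨hb1, hb2, hb3, hb4⟩, hc, hn⟩, rfl⟩ |
            ⟨⟨⟨hb1, hb2, hb3, hb4⟩, hc, hn⟩, rfl⟩ |
            ⟨⟨⟨hb1, hb2, hb3, hb4⟩, hc, hn⟩, rfl⟩ |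
            ⟨⟨⟨hb1, hb2, hb3, hb4⟩, hc, hn⟩, rfl⟩) <;>
      refine ⟨⟨by omega, by omega, by omega, by omega, by simpa⟩, by simp, by simpa⟩
  · rintro ⟨⟨h1, h2, h3, h4, h5⟩, hnbr, hnv⟩
    rcases hnbr with rfl | rfl | rfl | rfl
    · exact Or.inr (Or.inr (Or.inl ⟨⟨⟨by omega, by omega, by omega,
        by omega⟩, by simpa using h5, by simpa using hnv⟩, rfl⟩))
    · exact Or.inr (Or.inr (Or.inr ⟨⟨⟨by omega, by omega, by omega,
        by omega⟩, by simpa using h5, by simpa using hnv⟩, rfl⟩))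
    · exact Or.inl ⟨⟨⟨by omega, by omega, by omega,
        by omega⟩, by simpa using h5, by simpa using hnv⟩, rfl⟩
    · exact Or.inr (Or.inl ⟨⟨⟨by omega, by omega, by omega,
        by omega⟩, by simpa using h5, by simpa using hnv⟩, rfl⟩)

-- DFS characterisation -------------------------------------------------------

theorem dfsA_nodup (board : List (List String)) (visited : PySem.Set (Int × Int))
    (stack : List (Int × Int)) :
    visited.Nodup → (dfsA board (board.length : Int) visited stack).Nodup := by
  fun_induction dfsA board ((board.length : Int)) visited stack with
  | case1 visited stack hs => exact fun h => h
  | case2 visited stack xy hs rest hv ih => exact ih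
  | case3 visited stack xy hs rest hv hb visited' stack' ih =>
    exact fun h => ih (PySem.Set.nodup_add _ _ h)
  | case4 visited stack xy hs rest hv hb ih => exact ih

theorem dfsA_super (board : List (List String)) (visited : PySem.Set (Int × Int))
    (stack : List (Int × Int)) :
    (∀ p ∈ stack, TileB board p) →
    ∀ p, (p ∈ visited ∨ p ∈ stack) → p ∈ dfsA board (board.length : Int) visited stack := by
  fun_induction dfsA board ((board.length : Int)) visited stack with
  | case1 visited stack hs =>
    rw [List.getLast?_eq_none_iff] at hs
    subst hs
    rintro _ p (hp | hp)
    · exact hp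
    · simp at hp
  | case2 visited stack xy hs rest hv ih =>
    intro ht p hp
    have hne : stack ≠ [] := by rintro rfl; simp at hs
    have hdec : rest ++ [xy] = stack := by
      have h2 : stack.getLast hne = xy := by
        have h3 := List.getLast?_eq_some_getLast hne
        rw [h3] at hs
        exact Option.some_inj.mp hs
      rw [← h2]
      exact List.dropLast_append_getLast hne
    refine ih (fun r hr => ht r (by rw [← hdec]; exact List.mem_append_left _ hr)) p ?_
    rcases hp with hp | hp
    · exact Or.inl hp
    · rw [← hdec] at hp
      rcases List.mem_append.1 hp with hp | hp
      · exact Or.inr hp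
      · simp at hp; subst hp; exact Or.inl hv
  | case3 visited stack xy hs rest hv hb visited' stack' ih =>
    intro ht p hp
    have hne : stack ≠ [] := by rintro rfl; simp at hs
    have hdec : rest ++ [xy] = stack := by
      have h2 : stack.getLast hne = xy := by
        have h3 := List.getLast?_eq_some_getLast hne
        rw [h3] at hs
        exact Option.some_inj.mp hs
      rw [← h2]
      exact List.dropLast_append_getLast hne
    refine ih (fun r hr => ?_) p ?_
    · rcases (stack'_mem board xy r visited' rest).1 hr with hr | hr
      · exact ht r (by rw [← hdec]; exact List.mem_append_left _ hr)
      · exact hr.1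
    · rcases hp with hp | hp
      · exact Or.inl ((PySem.Set.mem_add _ _ _).2 (Or.inl hp))
      · rw [← hdec] at hp
        rcases List.mem_append.1 hp with hp | hp
        · exact Or.inr ((stack'_mem board xy p visited' rest).2 (Or.inl hp))
        · simp at hp; subst hp
          exact Or.inl ((PySem.Set.mem_add _ _ _).2 (Or.inr rfl))
  | case4 visited stack xy hs rest hv hb ih =>
    intro ht _ _
    have hne : stack ≠ [] := by rintro rfl; simp at hs
    have hxy : xy ∈ stack := by
      have h3 := List.getLast?_eq_some_getLast hne
      rw [h3] at hs
      exact Option.some_inj.mp hs ▸ List.getLast_mem hne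
    have := ht xy hxy
    exact absurd ⟨this.1, this.2.1, this.2.2.1, this.2.2.2.1⟩ hb

theorem dfsA_sound (board : List (List String)) (s : Int × Int)
    (visited : PySem.Set (Int × Int)) (stack : List (Int × Int)) :
    (∀ p ∈ stack, TileB board p) →
    (∀ p ∈ visited, ReachB board s p) → (∀ p ∈ stack, ReachB board s p) →
    ∀ p ∈ dfsA board (board.length : Int) visited stack, ReachB board s p := by
  fun_induction dfsA board ((board.length : Int)) visited stack with
  | case1 visited stack hs =>
    intro _ hv _ p hp
    exact hv p hp
  | case2 visited stack xy hs rest hv ih =>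
    intro ht hvr hsr
    have hne : stack ≠ [] := by rintro rfl; simp at hs
    have hdec : rest ++ [xy] = stack := by
      have h2 : stack.getLast hne = xy := by
        have h3 := List.getLast?_eq_some_getLast hne
        rw [h3] at hs
        exact Option.some_inj.mp hs
      rw [← h2]
      exact List.dropLast_append_getLast hne
    exact ih (fun r hr => ht r (by rw [← hdec]; exact List.mem_append_left _ hr))
      hvr (fun r hr => hsr r (by rw [← hdec]; exact List.mem_append_left _ hr))
  | case3 visited stack xy hs rest hv hb visited' stack' ih =>
    intro ht hvr hsr
    have hne : stack ≠ [] := by rintro rfl; simp at hs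
    have hdec : rest ++ [xy] = stack := by
      have h2 : stack.getLast hne = xy := by
        have h3 := List.getLast?_eq_some_getLast hne
        rw [h3] at hs
        exact Option.some_inj.mp hs
      rw [← h2]
      exact List.dropLast_append_getLast hne
    have hxy : xy ∈ stack := by rw [← hdec]; exact List.mem_append_right _ (by simp)
    have hreach_xy : ReachB board s xy := hsr xy hxy
    refine ih (fun r hr => ?_) (fun r hr => ?_) (fun r hr => ?_)
    · rcases (stack'_mem board xy r visited' rest).1 hr with hr | hr
      · exact ht r (by rw [← hdec]; exact List.mem_append_left _ hr)
      · exact hr.1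
    · rcases (PySem.Set.mem_add _ _ _).1 hr with hr | hr
      · exact hvr r hr
      · exact hr ▸ hreach_xy
    · rcases (stack'_mem board xy r visited' rest).1 hr with hr | hr
      · exact hsr r (by rw [← hdec]; exact List.mem_append_left _ hr)
      · exact Relation.ReflTransGen.tail hreach_xy ⟨hr.1, hr.2.1⟩
  | case4 visited stack xy hs rest hv hb ih =>
    intro ht _ _
    have hne : stack ≠ [] := by rintro rfl; simp at hs
    have hxy : xy ∈ stack := by
      have h3 := List.getLast?_eq_some_getLast hne
      rw [h3] at hs
      exact Option.some_inj.mp hs ▸ List.getLast_mem hne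
    have := ht xy hxy
    exact absurd ⟨this.1, this.2.1, this.2.2.1, this.2.2.2.1⟩ hb

theorem dfsA_closed (board : List (List String)) (visited : PySem.Set (Int × Int))
    (stack : List (Int × Int)) :
    (∀ p ∈ stack, TileB board p) →
    (∀ p ∈ visited, ∀ q, TileB board q → NbrB p q → q ∈ visited ∨ q ∈ stack) →
    ∀ p ∈ dfsA board (board.length : Int) visited stack, ∀ q, TileB board q → NbrB p q →
      q ∈ dfsA board (board.length : Int) visited stack := by
  fun_induction dfsA board ((board.length : Int)) visited stack with
  | case1 visited stack hs =>
    rw [List.getLast?_eq_none_iff] at hs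
    subst hs
    intro _ hcl p hp q htq hnq
    rcases hcl p hp q htq hnq with h | h
    · exact h
    · simp at h
  | case2 visited stack xy hs rest hv ih =>
    intro ht hcl
    have hne : stack ≠ [] := by rintro rfl; simp at hs
    have hdec : rest ++ [xy] = stack := by
      have h2 : stack.getLast hne = xy := by
        have h3 := List.getLast?_eq_some_getLast hne
        rw [h3] at hs
        exact Option.some_inj.mp hs
      rw [← h2]
      exact List.dropLast_append_getLast hne
    refine ih (fun r hr => ht r (by rw [← hdec]; exact List.mem_append_left _ hr))
      (fun p hp q htq hnq => ?_)
    rcases hcl p hp q htq hnq with h | h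
    · exact Or.inl h
    · rw [← hdec] at h
      rcases List.mem_append.1 h with h | h
      · exact Or.inr h
      · simp at h; subst h; exact Or.inl hv
  | case3 visited stack xy hs rest hv hb visited' stack' ih =>
    intro ht hcl
    have hne : stack ≠ [] := by rintro rfl; simp at hs
    have hdec : rest ++ [xy] = stack := by
      have h2 : stack.getLast hne = xy := by
        have h3 := List.getLast?_eq_some_getLast hne
        rw [h3] at hs
        exact Option.some_inj.mp hs
      rw [← h2]
      exact List.dropLast_append_getLast hne
    refine ih (fun r hr => ?_) (fun p hp q htq hnq => ?_)
    · rcases (stack'_mem board xy r visited' rest).1 hr with hr | hr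
      · exact ht r (by rw [← hdec]; exact List.mem_append_left _ hr)
      · exact hr.1
    · rcases (PySem.Set.mem_add _ _ _).1 hp with hp | hp
      · rcases hcl p hp q htq hnq with h | h
        · exact Or.inl ((PySem.Set.mem_add _ _ _).2 (Or.inl h))
        · rw [← hdec] at h
          rcases List.mem_append.1 h with h | h
          · exact Or.inr ((stack'_mem board xy q visited' rest).2 (Or.inl h))
          · simp at h; subst h
            exact Or.inl ((PySem.Set.mem_add _ _ _).2 (Or.inr rfl))
      · subst hp
        by_cases hq : q ∈ visited'
        · exact Or.inl hq
        · exact Or.inr ((stack'_mem board p q visited' rest).2 (Or.inr ⟨htq, hnq, hq⟩))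
  | case4 visited stack xy hs rest hv hb ih =>
    intro ht _
    have hne : stack ≠ [] := by rintro rfl; simp at hs
    have hxy : xy ∈ stack := by
      have h3 := List.getLast?_eq_some_getLast hne
      rw [h3] at hs
      exact Option.some_inj.mp hs ▸ List.getLast_mem hne
    have := ht xy hxy
    exact absurd ⟨this.1, this.2.1, this.2.2.1, this.2.2.2.1⟩ hb

theorem dfsA_correct (board : List (List String)) (s : Int × Int) (hts : TileB board s) :
    (∀ q, q ∈ dfsA board (board.length : Int) PySem.Set.empty [s] ↔ ReachB board s q) ∧
    (dfsA board (board.length : Int) PySem.Set.empty [s]).Nodup := by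
  have htstack : ∀ p ∈ [s], TileB board p := by
    intro p hp; simp at hp; subst hp; exact hts
  constructor
  · intro q
    constructor
    · intro hq
      exact dfsA_sound board s PySem.Set.empty [s] htstack (by simp [PySem.Set.empty])
        (by intro p hp; simp at hp; subst hp; exact Relation.ReflTransGen.refl) q hq
    · intro hq
      induction hq with
      | refl =>
        exact dfsA_super board PySem.Set.empty [s] htstack s (Or.inr (by simp))
      | tail hr hstep ih =>
        exact dfsA_closed board PySem.Set.empty [s] htstack
          (by intro p hp; simp [PySem.Set.empty] at hp) _ ih _ hstep.1 hstep.2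
  · exact dfsA_nodup board PySem.Set.empty [s] (by simp [PySem.Set.empty])

theorem foldl_prefix {α β : Type} (g : List β → α → List β)
    (h : ∀ acc x, acc <+: g acc x) : ∀ (l : List α) (acc : List β), acc <+: l.foldl g acc := by
  intro l
  induction l with
  | nil => intro acc; exact List.prefix_rfl
  | cons x l ih => intro acc; exact (h acc x).trans (ih (g acc x))

theorem foldl_fixed {α β : Type} (g : List β → α → List β)
    (h : ∀ acc x, acc <+: g acc x) :
    ∀ (l : List α) (acc : List β), l.foldl g acc = acc → ∀ x ∈ l, g acc x = acc := by
  intro l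
  induction l with
  | nil => intro acc _ x hx; simp at hx
  | cons y l ih =>
    intro acc hfix x hx
    have h1 : acc <+: g acc y := h acc y
    have h2 : g acc y <+: l.foldl g (g acc y) := foldl_prefix g h l (g acc y)
    have h3 : l.foldl g (g acc y) = acc := hfix
    have heq : g acc y = acc := by
      have := h2
      rw [h3] at this
      exact this.eq_of_length_le h1.length_le
    rcases List.mem_cons.1 hx with rfl | hx
    · exact heq
    · have h4 : l.foldl g acc = acc := by
        conv_lhs => rw [← heq]
        exact h3
      exact ih acc h4 x hx

theorem sweep_step_prefix (r : PySem.Set (Int × Int)) (p : Int × Int) :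
    r <+: (if p ∈ r then r
      else if (p.1 + 1, p.2) ∈ r ∨ (p.1 - 1, p.2) ∈ r ∨ (p.1, p.2 + 1) ∈ r ∨ (p.1, p.2 - 1) ∈ r
      then PySem.Set.add r p else r) := by
  split_ifs with h1 h2
  · exact List.prefix_rfl
  · rw [PySem.Set.add_of_not_mem h1]
    exact List.prefix_append _ _
  · exact List.prefix_rfl

theorem sweep_prefix (tiles : List (Int × Int)) (r : PySem.Set (Int × Int)) :
    r <+: sweepB tiles r :=
  foldl_prefix _ (fun acc x => sweep_step_prefix acc x) tiles r

theorem sweep_nodup (tiles : List (Int × Int)) :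
    ∀ r : PySem.Set (Int × Int), r.Nodup → (sweepB tiles r).Nodup := by
  induction tiles with
  | nil => intro r h; exact h
  | cons p tiles ih =>
    intro r h
    unfold sweepB
    simp only [List.foldl]
    split_ifs with h1 h2
    · exact ih r h
    · exact ih _ (PySem.Set.nodup_add _ _ h)
    · exact ih r h

theorem sweep_mem_sub (tiles : List (Int × Int)) :
    ∀ (r : PySem.Set (Int × Int)) (q : Int × Int),
      q ∈ sweepB tiles r → q ∈ r ∨ q ∈ tiles := by
  induction tiles with
  | nil => intro r q h; exact Or.inl h
  | cons p tiles ih =>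
    intro r q h
    unfold sweepB at h
    simp only [List.foldl] at h
    split_ifs at h with h1 h2
    · rcases ih r q h with h | h
      · exact Or.inl h
      · exact Or.inr (List.mem_cons_of_mem _ h)
    · rcases ih _ q h with h | h
      · rcases (PySem.Set.mem_add _ _ _).1 h with h | h
        · exact Or.inl h
        · exact Or.inr (h ▸ List.mem_cons_self)
      · exact Or.inr (List.mem_cons_of_mem _ h)
    · rcases ih r q h with h | h
      · exact Or.inl h
      · exact Or.inr (List.mem_cons_of_mem _ h)

theorem sweep_sound (board : List (List String)) (s : Int × Int) (tiles : List (Int × Int))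
    (htiles : ∀ p ∈ tiles, TileB board p) :
    ∀ r : PySem.Set (Int × Int), (∀ q ∈ r, ReachB board s q) →
      ∀ q ∈ sweepB tiles r, ReachB board s q := by
  induction tiles with
  | nil => intro r hr q hq; exact hr q hq
  | cons p tiles ih =>
    intro r hr q hq
    have htp : TileB board p := htiles p List.mem_cons_self
    have htiles' : ∀ x ∈ tiles, TileB board x := fun x hx => htiles x (List.mem_cons_of_mem _ hx)
    unfold sweepB at hq
    simp only [List.foldl] at hq
    split_ifs at hq with h1 h2
    · exact ih htiles' r hr q hq
    · refine ih htiles' _ (fun x hx => ?_) q hq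
      rcases (PySem.Set.mem_add _ _ _).1 hx with hx | hx
      · exact hr x hx
      · subst hx
        rcases h2 with h2 | h2 | h2 | h2
        · exact Relation.ReflTransGen.tail (hr _ h2) ⟨htp, Or.inr (Or.inl (by
            rcases x with ⟨a, b⟩; simp))⟩
        · exact Relation.ReflTransGen.tail (hr _ h2) ⟨htp, Or.inl (by
            rcases x with ⟨a, b⟩; simp)⟩
        · exact Relation.ReflTransGen.tail (hr _ h2) ⟨htp, Or.inr (Or.inr (Or.inr (by
            rcases x with ⟨a, b⟩; simp)))⟩
        · exact Relation.ReflTransGen.tail (hr _ h2) ⟨htp, Or.inr (Or.inr (Or.inl (by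
            rcases x with ⟨a, b⟩; simp)))⟩
    · exact ih htiles' r hr q hq

theorem iterate_of_fixed (tiles : List (Int × Int)) (r : PySem.Set (Int × Int))
    (h : sweepB tiles r = r) : ∀ k, (sweepB tiles)^[k] r = r := by
  intro k
  induction k with
  | zero => rfl
  | succ k ih => rw [Function.iterate_succ_apply', ih, h]

theorem propB_eq_iterate (tiles : List (Int × Int)) :
    ∀ (fuel : Nat) (r : PySem.Set (Int × Int)),
      propB tiles fuel r = (sweepB tiles)^[fuel] r := by
  intro fuel
  induction fuel with
  | zero => intro r; rfl
  | succ fuel ih =>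
    intro r
    unfold propB
    dsimp only
    split_ifs with hfix
    · exact (iterate_of_fixed tiles r hfix (fuel + 1)).symm
    · rw [ih (sweepB tiles r), Function.iterate_succ_apply]

theorem sweep_fixed_closed (board : List (List String)) (tiles : List (Int × Int))
    (W : PySem.Set (Int × Int)) (hfix : sweepB tiles W = W) :
    ∀ p ∈ W, ∀ q ∈ tiles, NbrB p q → q ∈ W := by
  intro p hp q hq hnbr
  by_contra hqW
  have hstep := foldl_fixed _ (fun acc x => sweep_step_prefix acc x) tiles W hfix q hq
  rw [if_neg hqW] at hstep
  have hcond : (q.1 + 1, q.2) ∈ W ∨ (q.1 - 1, q.2) ∈ W ∨ (q.1, q.2 + 1) ∈ W ∨ (q.1, q.2 - 1) ∈ W := by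
    rcases p with ⟨a, b⟩
    rcases q with ⟨c, d⟩
    unfold NbrB at hnbr
    simp only [Prod.mk.injEq] at hnbr
    rcases hnbr with ⟨rfl, rfl⟩ | ⟨rfl, rfl⟩ | ⟨rfl, rfl⟩ | ⟨rfl, rfl⟩
    · exact Or.inr (Or.inl (by simpa using hp))
    · exact Or.inl (by simpa using hp)
    · exact Or.inr (Or.inr (Or.inr (by simpa using hp)))
    · exact Or.inr (Or.inr (Or.inl (by simpa using hp)))
  rw [if_pos hcond, PySem.Set.add_of_not_mem hqW] at hstep
  simpa using congrArg List.length hstep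

theorem orbit_fix {f : List (Int × Int) → List (Int × Int)} {r₀ : List (Int × Int)} {N : Nat}
    (hpre : ∀ r, r <+: f r)
    (hlen : ∀ k, (f^[k] r₀).length ≤ N + r₀.length) :
    f (f^[N] r₀) = f^[N] r₀ := by
  by_contra hne
  have hstab : ∀ k, k ≤ N → f (f^[k] r₀) ≠ f^[k] r₀ := by
    intro k hk hfix
    have hconst : ∀ m, f^[k + m] r₀ = f^[k] r₀ := by
      intro m
      induction m with
      | zero => rfl
      | succ m ih =>
        rw [← Nat.add_assoc, Function.iterate_succ_apply', ih, hfix]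
    have hNk : f^[N] r₀ = f^[k] r₀ := by
      have := hconst (N - k)
      rwa [Nat.add_sub_cancel' hk] at this
    exact hne (by rw [hNk, hfix])
  have hgrow : ∀ k, k ≤ N + 1 → r₀.length + k ≤ (f^[k] r₀).length := by
    intro k
    induction k with
    | zero => intro _; simp
    | succ k ih =>
      intro hk
      have h1 := ih (by omega)
      have h2 : f^[k + 1] r₀ = f (f^[k] r₀) := Function.iterate_succ_apply' f k r₀
      have h3 : (f^[k] r₀) <+: f (f^[k] r₀) := hpre _
      have h4 : f (f^[k] r₀) ≠ f^[k] r₀ := hstab k (by omega)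
      have h5 : (f^[k] r₀).length < (f (f^[k] r₀)).length := by
        rcases Nat.lt_or_ge (f^[k] r₀).length (f (f^[k] r₀)).length with h | h
        · exact h
        · exact absurd (h3.eq_of_length_le h).symm h4
      have h6 := congrArg List.length h2
      simp only at h6
      omega
  have := hgrow (N + 1) le_rfl
  have := hlen (N + 1)
  omega

theorem tilesOf_length_le (board : List (List String)) :
    (tilesOf board).length ≤ board.length * board.length := by
  rw [tilesOf_eq_filter]
  calc ((pairsOf board).filter _).length ≤ (pairsOf board).length := List.length_filter_le _ _
    _ = board.length * board.length := by
        unfold pairsOf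
        rw [List.length_flatMap]
        simp [PySem.List.length_pyRange_one]

theorem sweepB_correct (board : List (List String)) (t0 : Int × Int)
    (ht : TileB board t0) :
    (∀ q, q ∈ (sweepB (tilesOf board))^[((board.length : Int) * (board.length : Int)).toNat]
        (PySem.Set.add PySem.Set.empty t0) ↔ ReachB board t0 q) ∧
    ((sweepB (tilesOf board))^[((board.length : Int) * (board.length : Int)).toNat]
        (PySem.Set.add PySem.Set.empty t0)).Nodup := by
  have hr0 : PySem.Set.add PySem.Set.empty t0 = [t0] := by
    rw [PySem.Set.add_of_not_mem (by simp [PySem.Set.empty])]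
    rfl
  set f := sweepB (tilesOf board) with hf
  set N := ((board.length : Int) * (board.length : Int)).toNat with hN
  have hNval : N = board.length * board.length := by
    rw [hN, ← Nat.cast_mul, Int.toNat_natCast]
  have htiles : ∀ p ∈ tilesOf board, TileB board p := fun p hp => mem_tilesOf.1 hp
  have ht0mem : t0 ∈ tilesOf board := mem_tilesOf.2 ht
  have hpre : ∀ r, r <+: f r := fun r => sweep_prefix _ r
  -- all iterates: subset of tiles and nodup
  have hsub : ∀ k, ∀ q ∈ f^[k] (PySem.Set.add PySem.Set.empty t0), q ∈ tilesOf board := by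
    intro k
    induction k with
    | zero =>
      intro q hq
      rw [hr0] at hq
      simp at hq
      exact hq ▸ ht0mem
    | succ k ih =>
      intro q hq
      rw [Function.iterate_succ_apply'] at hq
      rcases sweep_mem_sub _ _ q hq with h | h
      · exact ih q h
      · exact h
  have hnodup : ∀ k, (f^[k] (PySem.Set.add PySem.Set.empty t0)).Nodup := by
    intro k
    induction k with
    | zero => rw [hr0]; simp
    | succ k ih =>
      rw [Function.iterate_succ_apply']
      exact sweep_nodup _ _ ih
  have hlen : ∀ k, (f^[k] (PySem.Set.add PySem.Set.empty t0)).length ≤ N + (PySem.Set.add PySem.Set.empty t0).length := by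
    intro k
    have h1 : (f^[k] (PySem.Set.add PySem.Set.empty t0)).length ≤ (tilesOf board).length :=
      ((hnodup k).subperm (fun q hq => hsub k q hq)).length_le
    have h2 := tilesOf_length_le board
    have h3 : (PySem.Set.add PySem.Set.empty t0).length = 1 := by rw [hr0]; rfl
    omega
  have hfixW : f (f^[N] (PySem.Set.add PySem.Set.empty t0)) = f^[N] (PySem.Set.add PySem.Set.empty t0) :=
    orbit_fix hpre hlen
  have hsound : ∀ k, ∀ q ∈ f^[k] (PySem.Set.add PySem.Set.empty t0), ReachB board t0 q := by
    intro k
    induction k with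
    | zero =>
      intro q hq
      rw [hr0] at hq
      simp at hq
      exact hq ▸ Relation.ReflTransGen.refl
    | succ k ih =>
      intro q hq
      rw [Function.iterate_succ_apply'] at hq
      exact sweep_sound board t0 _ htiles _ ih q hq
  have ht0W : t0 ∈ f^[N] (PySem.Set.add PySem.Set.empty t0) := by
    have hpref : (PySem.Set.add PySem.Set.empty t0) <+: f^[N] (PySem.Set.add PySem.Set.empty t0) := by
      clear hfixW hlen
      induction N with
      | zero => exact List.prefix_rfl
      | succ n ih =>
        rw [Function.iterate_succ_apply']
        exact ih.trans (hpre _)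
    exact hpref.subset (by rw [hr0]; simp)
  refine ⟨fun q => ⟨hsound N q, fun hq => ?_⟩, hnodup N⟩
  induction hq with
  | refl => exact ht0W
  | tail hr hstep ihq =>
    exact sweep_fixed_closed board _ _ hfixW _ ihq _ (mem_tilesOf.2 hstep.1) hstep.2

-- ===== VERDICT (by name: the statement is the Claim_ definition above) =====
theorem areTilesConnected_spec : Claim_equal_areTilesConnected := by
  intro board _ _
  unfold Spec_areTilesConnected
  have hB : areTilesConnected_alt board =
      (match tilesOf board with
      | [] => false
      | t0 :: _ =>
        decide (PySem.Set.len (propB (tilesOf board)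
            (((board.length : Int) * (board.length : Int)).toNat)
            (PySem.Set.add PySem.Set.empty t0))
          = (tilesOf board).length)) := rfl
  have hA : areTilesConnected board =
      (if ((tilesOf board).length : Int) = 0 then false
       else
        match (tilesOf board).head? with
        | none => false
        | some s =>
          decide ((PySem.Set.len (dfsA board (board.length : Int) PySem.Set.empty [s]) : Int)
            = ((tilesOf board).length : Int))) := by
    unfold areTilesConnected
    dsimp only
    rw [scanA_eq board]
  rw [hA, hB]
  rcases h : tilesOf board with _ | ⟨t0, rest⟩
  · simp
  · have ht0 : TileB board t0 := mem_tilesOf.1 (h ▸ List.mem_cons_self)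
    have hlen0 : (((t0 :: rest).length : Nat) : Int) ≠ 0 := by
      simp
      omega
    rw [if_neg hlen0]
    simp only [List.head?]
    rw [propB_eq_iterate]
    have hV := dfsA_correct board t0 ht0
    have hW := sweepB_correct board t0 ht0
    rw [h] at hW
    have hperm : List.Perm (dfsA board (board.length : Int) PySem.Set.empty [t0])
        ((sweepB (t0 :: rest))^[((board.length : Int) * (board.length : Int)).toNat]
          (PySem.Set.add PySem.Set.empty t0)) := by
      refine (List.perm_ext_iff_of_nodup hV.2 hW.2).2 (fun q => ?_)
      rw [hV.1 q, hW.1 q]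
    have hlen : PySem.Set.len (dfsA board (board.length : Int) PySem.Set.empty [t0])
        = PySem.Set.len ((sweepB (t0 :: rest))^[((board.length : Int) * (board.length : Int)).toNat]
            (PySem.Set.add PySem.Set.empty t0)) := by
      simpa [PySem.Set.len] using hperm.length_eq
    rw [hlen]
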